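-- pv_equiv track=rewrite | github.com/jisuuuu/Algorithm_Study | heap_2.py | solution
-- ===== SOURCE A (Python) =====
-- import heapq
--
-- def solution(stock, dates, supplies, k):
--     answer = 0
--     idx = 0
--     h = []
--
--     while stock < k:
--         for i in range(idx, len(dates)):
--             if stock < dates[i]:
--                 break
--             heapq.heappush(h, -supplies[i]) # -1 처리 하는 이유: heapq 라이브러리 최소 힙 기반
--             idx = i + 1
--
--         stock += (heapq.heappop(h) * -1) #꺼낼 때도 -1 곱해서 원래 수로 만들어서 사용
--         answer += 1
--
--     return answer
-- ===== SOURCE B (Python) =====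
-- def solution(stock, dates, supplies, k):
--     answer = 0
--     pairs = list(zip(dates, supplies))
--     available = []
--
--     while stock < k:
--         while pairs and pairs[0][0] <= stock:
--             available.append(pairs.pop(0)[1])
--
--         best = max(available)
--         available.remove(best)
--         stock += best
--         answer += 1
--
--     return answer
-- ===== Notes on version B (the rewrite author's own statement) =====
-- stated objective: simpler
-- what changed: Replaces the index-driven scan plus negated-value min-heap by structural consumption of a zipped (date,supply) list into a plain pool selected with max() and remove() each round.
-- outside the precondition, e.g. on solution(5, [0, 4], [-3, 100], 6): A returns 1, B returns 1; on solution(0, [0, 5], [7], 5): A returns 1, B returns 1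
import Mathlib
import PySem

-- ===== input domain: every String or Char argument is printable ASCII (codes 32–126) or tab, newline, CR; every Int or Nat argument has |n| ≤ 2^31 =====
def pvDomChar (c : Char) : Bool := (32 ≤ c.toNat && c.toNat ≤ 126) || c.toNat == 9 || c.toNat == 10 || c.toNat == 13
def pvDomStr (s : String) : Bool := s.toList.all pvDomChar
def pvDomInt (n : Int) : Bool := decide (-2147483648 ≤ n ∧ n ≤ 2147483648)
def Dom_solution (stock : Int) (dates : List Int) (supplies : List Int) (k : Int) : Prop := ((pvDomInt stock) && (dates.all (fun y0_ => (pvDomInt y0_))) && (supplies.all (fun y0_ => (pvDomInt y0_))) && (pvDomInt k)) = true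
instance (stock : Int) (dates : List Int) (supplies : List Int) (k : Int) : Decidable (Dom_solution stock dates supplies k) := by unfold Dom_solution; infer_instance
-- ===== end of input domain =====

-- B replaces A's index scan + negated-value min-heap by structural consumption of a
-- zipped (date,supply) list into a plain pool selected with max/remove (objective: simpler).

-- ===== PORT A =====
-- inner `for i in range(idx, len(dates))` push loop; returns (new idx, new heap contents).
-- heapq.heappush/heappop are ported by their library semantics on the heap's CONTENTS:
-- push adds the element, pop removes and returns the minimum (the internal array layout
-- of a binary heap is unobservable in A's result). `supplies.getD i 0` is exact whenever
-- dates.length ≤ supplies.length (guaranteed by Pre_ on any input that reaches it).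
def scanPushA (stock : Int) (dates supplies : List Int) (i : Nat) (h : List Int) : Nat × List Int :=
  if hi : i < dates.length then
    if stock < dates.getD i 0 then (i, h)
    else scanPushA stock dates supplies (i + 1) (h ++ [-(supplies.getD i 0)])
  else (i, h)
termination_by dates.length - i

-- the `while stock < k` loop; fuel = dates.length + 1 suffices on every input where the
-- Python loop terminates normally (each round pops one pushed element, pushes ≤ length total).
def loopA (dates supplies : List Int) (k : Int) : Nat → Int → Nat → List Int → Int → Int
  | 0, _, _, _, answer => answer
  | fuel + 1, stock, idx, h, answer =>
    if stock < k then
      let p := scanPushA stock dates supplies idx h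
      match PySem.List.min? p.2 (fun x => x) with
      | none => answer  -- Python: heappop from empty heap raises IndexError (outside Pre_)
      | some m => loopA dates supplies k fuel (stock + m * (-1)) p.1 (p.2.erase m) (answer + 1)
    else answer

def solution (stock : Int) (dates : List Int) (supplies : List Int) (k : Int) : Int :=
  loopA dates supplies k (dates.length + 1) stock 0 [] 0

-- ===== PORT B =====
-- `while pairs and pairs[0][0] <= stock: available.append(pairs.pop(0)[1])`
def takeAvailB (stock : Int) : List (Int × Int) → List Int → List Int × List (Int × Int)
  | [], av => (av, [])
  | (d, s) :: rest, av =>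
      if d ≤ stock then takeAvailB stock rest (av ++ [s]) else (av, (d, s) :: rest)

-- the `while stock < k` loop over the remaining zipped (date, supply) pairs
def loopB (k : Int) : Nat → Int → List (Int × Int) → List Int → Int → Int
  | 0, _, _, _, answer => answer
  | fuel + 1, stock, pairs, av, answer =>
    if stock < k then
      let p := takeAvailB stock pairs av
      match PySem.List.max? p.1 (fun x => x) with
      | none => answer  -- Python: max([]) raises ValueError (outside Pre_)
      | some best =>
        match PySem.List.remove? p.1 best with
        | none => answer  -- unreachable: best ∈ p.1
        | some av' => loopB k fuel (stock + best) p.2 av' (answer + 1)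
    else answer

def solution_alt (stock : Int) (dates : List Int) (supplies : List Int) (k : Int) : Int :=
  loopB k (dates.length + 1) stock (dates.zip supplies) [] 0

-- ===== PRECONDITION & SPEC =====
-- feasibility: the stock obtained by consuming every supply of the maximal affordable
-- prefix of (dates, supplies)
def takeAllPre (pairs : List (Int × Int)) (s : Int) : Int :=
  match pairs with
  | [] => s
  | p :: rest => if s < p.1 then s else takeAllPre rest (s + p.2)

-- Pre_ excludes (besides the inputs where A raises IndexError on an exhausted heap or an
-- out-of-range supplies[i]) inputs with stock < k and a negative supply or mismatched list
-- lengths, outside the task's natural domain, on a few of which A still happens to return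
-- before touching them; see claim.json "cites".
def Pre_solution (stock : Int) (dates : List Int) (supplies : List Int) (k : Int) : Prop :=
  k ≤ stock ∨
    ((∀ x ∈ supplies, 0 ≤ x) ∧ dates.length ≤ supplies.length ∧
      k ≤ takeAllPre (dates.zip supplies) stock)
instance (stock : Int) (dates : List Int) (supplies : List Int) (k : Int) : Decidable (Pre_solution stock dates supplies k) := by unfold Pre_solution; infer_instance

def pvWitness_solution : Int × List Int × List Int × Int := (0, [0, 1], [3, 3], 5)

def Spec_solution (stock : Int) (dates : List Int) (supplies : List Int) (k : Int) (out : Int) : Prop := out = solution_alt stock dates supplies k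
instance (stock : Int) (dates : List Int) (supplies : List Int) (k : Int) (out : Int) : Decidable (Spec_solution stock dates supplies k out) := by unfold Spec_solution; infer_instance

-- ===== CLAIM (what is proved, stated in full; the proofs are below) =====
def Claim_equal_solution : Prop := ∀ (stock : Int) (dates : List Int) (supplies : List Int) (k : Int), Dom_solution stock dates supplies k → Pre_solution stock dates supplies k → Spec_solution stock dates supplies k (solution stock dates supplies k)

-- ===== LEMMAS AND PROOFS =====

-- dropping i < |dates| elements of the zip exposes the i-th pair
theorem drop_zip_cons (dates supplies : List Int) (i : Nat)
    (hi : i < dates.length) (hlen : dates.length ≤ supplies.length) :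
    (dates.zip supplies).drop i =
      (dates.getD i 0, supplies.getD i 0) :: (dates.zip supplies).drop (i + 1) := by
  have hz : i < (dates.zip supplies).length := by
    rw [List.length_zip]; omega
  have his : i < supplies.length := by omega
  rw [List.drop_eq_getElem_cons hz]
  congr 1
  rw [List.getElem_zip, List.getD_eq_getElem dates 0 hi, List.getD_eq_getElem supplies 0 his]

-- A's inner push loop and B's inner pop-from-pairs loop advance in lock-step:
-- A's heap stays the pointwise negation of B's pool, and B's remaining pairs
-- are exactly the zip dropped at A's new idx.
theorem scan_rel (stock : Int) (dates supplies : List Int)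
    (hlen : dates.length ≤ supplies.length) :
    ∀ (n i : Nat) (av : List Int), dates.length - i = n → i ≤ dates.length →
      (scanPushA stock dates supplies i (av.map (fun x => -x))).1 ≤ dates.length ∧
      (scanPushA stock dates supplies i (av.map (fun x => -x))).2 =
        (takeAvailB stock ((dates.zip supplies).drop i) av).1.map (fun x => -x) ∧
      (takeAvailB stock ((dates.zip supplies).drop i) av).2 =
        (dates.zip supplies).drop ((scanPushA stock dates supplies i (av.map (fun x => -x))).1) := by
  intro n
  induction n with
  | zero =>
    intro i av hn hile
    have hi : ¬ i < dates.length := by omega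
    have hdrop : (dates.zip supplies).drop i = [] := by
      apply List.drop_eq_nil_of_le
      rw [List.length_zip]; omega
    unfold scanPushA
    rw [dif_neg hi, hdrop]
    exact ⟨hile, rfl, by simp [takeAvailB]⟩
  | succ n ih =>
    intro i av hn hile
    by_cases hi : i < dates.length
    · rw [drop_zip_cons dates supplies i hi hlen]
      unfold scanPushA takeAvailB
      rw [dif_pos hi]
      by_cases hb : stock < dates.getD i 0
      · rw [if_pos hb, if_neg (by omega : ¬ dates.getD i 0 ≤ stock)]
        exact ⟨by omega, rfl, (drop_zip_cons dates supplies i hi hlen).symm⟩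
      · rw [if_neg hb, if_pos (by omega : dates.getD i 0 ≤ stock)]
        have := ih (i + 1) (av ++ [supplies.getD i 0]) (by omega) (by omega)
        simpa only [List.map_append, List.map_cons, List.map_nil] using this
    · unfold scanPushA
      rw [dif_neg hi]
      have hdrop : (dates.zip supplies).drop i = [] := by
        apply List.drop_eq_nil_of_le
        rw [List.length_zip]; omega
      rw [hdrop]
      exact ⟨hile, rfl, by simp [takeAvailB]⟩

-- the minimum of the negated list is the negation of the maximum
theorem min_neg_of_max (av : List Int) (M : Int)
    (h : PySem.List.max? av (fun x => x) = some M) :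
    PySem.List.min? (av.map (fun x => -x)) (fun x => x) = some (-M) := by
  have hM := PySem.List.max?_mem h
  have hmax := PySem.List.max?_isMax h
  cases hmin : PySem.List.min? (av.map (fun x => -x)) (fun x => x) with
  | none =>
    rw [PySem.List.min?_eq_none_iff] at hmin
    rw [List.map_eq_nil_iff] at hmin
    subst hmin
    simp at hM
  | some m =>
    have hmem := PySem.List.min?_mem hmin
    have hisMin := PySem.List.min?_isMin hmin
    rcases List.mem_map.1 hmem with ⟨x, hx, hxm⟩
    have h1 : m ≤ -M := hisMin (-M) (List.mem_map.2 ⟨M, hM, rfl⟩)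
    have h2 : -M ≤ m := by
      have := hmax x hx
      simp only at this hxm
      omega
    have : m = -M := le_antisymm h1 h2
    rw [this]

-- main invariant: A's heap = the pointwise negation of B's pool, and B's pairs list
-- = the zip dropped at A's idx
theorem loop_rel (dates supplies : List Int) (k : Int)
    (hlen : dates.length ≤ supplies.length) :
    ∀ (fuel : Nat) (stock : Int) (idx : Nat) (av : List Int) (answer : Int),
      idx ≤ dates.length →
      loopA dates supplies k fuel stock idx (av.map (fun x => -x)) answer =
        loopB k fuel stock ((dates.zip supplies).drop idx) av answer := by
  intro fuel
  induction fuel with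
  | zero => intro stock idx av answer _; simp [loopA, loopB]
  | succ fuel ih =>
    intro stock idx av answer hidx
    by_cases hk : stock < k
    · simp only [loopA, loopB, hk, if_true]
      obtain ⟨hle, heap, hpairs⟩ :=
        scan_rel stock dates supplies hlen (dates.length - idx) idx av rfl hidx
      set av' := (takeAvailB stock ((dates.zip supplies).drop idx) av).1 with hav'
      rw [heap, hpairs]
      cases hmax : PySem.List.max? av' (fun x => x) with
      | none =>
        have hnil : av' = [] := (PySem.List.max?_eq_none_iff _ _).1 hmax
        have h1 : PySem.List.min? ((av'.map (fun x => -x))) (fun x => x) = none :=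
          (PySem.List.min?_eq_none_iff _ _).2 (by rw [hnil]; rfl)
        rw [h1]
      | some M =>
        rw [min_neg_of_max av' M hmax]
        have hMmem : M ∈ av' := PySem.List.max?_mem hmax
        dsimp only
        rw [PySem.List.remove?_eq_some_erase av' M hMmem]
        dsimp only
        have herase : (av'.map (fun x => -x)).erase (-M) = (av'.erase M).map (fun x => -x) := by
          rw [← List.map_erase (f := fun x => -x) (fun x y h => by dsimp at h; omega)]
        have harith : stock + -M * (-1) = stock + M := by ring
        simp only [herase, harith]
        exact ih (stock + M) _ (av'.erase M) (answer + 1) hle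
    · simp [loopA, loopB, hk]

-- ===== VERDICT (by name: the statement is the Claim_ definition above) =====
theorem solution_spec : Claim_equal_solution := by
  intro stock dates supplies k _ hpre
  unfold Spec_solution solution solution_alt
  rcases hpre with hks | ⟨_, hlen, _⟩
  · have hk : ¬ stock < k := by omega
    simp [loopA, loopB, hk]
  · have := loop_rel dates supplies k hlen (dates.length + 1) stock 0 [] 0 (by omega)
    simpa using this
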